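-- pv_equiv track=rewrite | github.com/eliottcassidy2000/math | 04-computation/beta2_bad_vertex_anatomy.py | get_dominators
-- ===== SOURCE A (Python) =====
-- def get_dominators(A, n, cyc):
--     """Get all external vertices that dominate this cycle."""
--     verts = set(cyc)
--     ext = [d for d in range(n) if d not in verts]
--     doms = []
--     for d in ext:
--         a, b, c = cyc
--         if (A[d][a] and A[d][b] and A[d][c]) or (A[a][d] and A[b][d] and A[c][d]):
--             doms.append(d)
--     return doms
-- ===== SOURCE B (Python) =====
-- def get_dominators(A, n, cyc):
--     """Get all external vertices that dominate this cycle."""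
--     a, b, c = cyc
--     def row_hits(v):  # successors of v: {j : A[v][j] truthy}
--         return {j for j in range(n) if A[v][j]}
--     def col_hits(v):  # predecessors of v: {i : A[i][v] truthy}
--         return {i for i in range(n) if A[i][v]}
--     doms = (col_hits(a) & col_hits(b) & col_hits(c)) | (row_hits(a) & row_hits(b) & row_hits(c))
--     return sorted(doms - set(cyc))
-- ===== Notes on version B (the rewrite author's own statement) =====
-- stated objective: alternative
-- what changed: Instead of scanning external vertices and testing a six-term compound boolean per vertex, B builds predecessor/successor neighbor sets for the three cycle vertices, intersects them, unions the two cases, subtracts the cycle and sorts.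
-- outside the precondition, e.g. on get_dominators([[0, 0], [0, 0]], 2, (0, 0, 5)): A returns [], B raises IndexError
import Mathlib
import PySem

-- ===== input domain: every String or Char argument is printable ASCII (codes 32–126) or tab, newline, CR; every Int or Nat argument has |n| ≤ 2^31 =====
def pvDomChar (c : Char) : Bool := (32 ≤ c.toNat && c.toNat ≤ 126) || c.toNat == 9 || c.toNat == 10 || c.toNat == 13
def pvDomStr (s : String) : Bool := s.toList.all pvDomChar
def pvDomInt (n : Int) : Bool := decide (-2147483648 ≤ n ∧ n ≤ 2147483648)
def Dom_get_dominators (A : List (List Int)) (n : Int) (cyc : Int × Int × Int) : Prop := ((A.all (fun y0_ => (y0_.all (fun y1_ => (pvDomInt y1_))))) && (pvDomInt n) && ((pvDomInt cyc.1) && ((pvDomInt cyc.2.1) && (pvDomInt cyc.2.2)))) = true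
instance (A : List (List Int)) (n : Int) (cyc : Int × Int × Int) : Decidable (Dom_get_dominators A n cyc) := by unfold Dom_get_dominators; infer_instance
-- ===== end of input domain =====

-- B replaces the per-vertex compound boolean test with neighbor-set intersections; same return value, no speed claim.

-- ===== PORT A =====
def get_dominators (A : List (List Int)) (n : Int) (cyc : Int × Int × Int) : List Int :=
  let verts : PySem.Set Int := PySem.Set.ofList [cyc.1, cyc.2.1, cyc.2.2]
  let ext := (PySem.List.pyRange 0 n 1).filter (fun d => !(PySem.Set.contains verts d))
  ext.foldl (fun doms d =>
    let a := cyc.1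
    let b := cyc.2.1
    let c := cyc.2.2
    if ((PySem.List.pyGetD (PySem.List.pyGetD A d []) a 0 != 0 &&
         PySem.List.pyGetD (PySem.List.pyGetD A d []) b 0 != 0 &&
         PySem.List.pyGetD (PySem.List.pyGetD A d []) c 0 != 0) ||
        (PySem.List.pyGetD (PySem.List.pyGetD A a []) d 0 != 0 &&
         PySem.List.pyGetD (PySem.List.pyGetD A b []) d 0 != 0 &&
         PySem.List.pyGetD (PySem.List.pyGetD A c []) d 0 != 0))
    then doms ++ [d] else doms) []

-- ===== PORT B =====
-- {j for j in range(n) if A[v][j]}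
def pvRowHits (A : List (List Int)) (n : Int) (v : Int) : PySem.Set Int :=
  PySem.Set.ofList ((PySem.List.pyRange 0 n 1).filter
    (fun j => PySem.List.pyGetD (PySem.List.pyGetD A v []) j 0 != 0))

-- {i for i in range(n) if A[i][v]}
def pvColHits (A : List (List Int)) (n : Int) (v : Int) : PySem.Set Int :=
  PySem.Set.ofList ((PySem.List.pyRange 0 n 1).filter
    (fun i => PySem.List.pyGetD (PySem.List.pyGetD A i []) v 0 != 0))

def get_dominators_alt (A : List (List Int)) (n : Int) (cyc : Int × Int × Int) : List Int :=
  let a := cyc.1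
  let b := cyc.2.1
  let c := cyc.2.2
  let doms : PySem.Set Int :=
    PySem.Set.union
      (PySem.Set.inter (PySem.Set.inter (pvColHits A n a) (pvColHits A n b)) (pvColHits A n c))
      (PySem.Set.inter (PySem.Set.inter (pvRowHits A n a) (pvRowHits A n b)) (pvRowHits A n c))
  PySem.List.sorted (PySem.Set.diff doms (PySem.Set.ofList [a, b, c])) (fun x => x) false

-- ===== PRECONDITION & SPEC =====
-- Pre_ admits the trivial case n ≤ 0 and otherwise exactly the inputs on which every matrix
-- access B makes (a superset of A's, some of which A may skip by boolean short-circuiting) is in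
-- Python's index range (negative indices allowed); outside it A raises IndexError, or returns only
-- because short-circuiting skips an out-of-range access on which B, evaluating all accesses, raises.
def Pre_get_dominators (A : List (List Int)) (n : Int) (cyc : Int × Int × Int) : Prop :=
  n ≤ 0 ∨
  (0 < n ∧ n ≤ (A.length : Int) ∧
   (∀ v ∈ [cyc.1, cyc.2.1, cyc.2.2],
      (-(A.length : Int) ≤ v ∧ v < (A.length : Int)) ∧
      n ≤ ((PySem.List.pyGetD A v []).length : Int)) ∧
   (∀ row ∈ A.take n.toNat, ∀ v ∈ [cyc.1, cyc.2.1, cyc.2.2],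
      -(row.length : Int) ≤ v ∧ v < (row.length : Int)))
instance (A : List (List Int)) (n : Int) (cyc : Int × Int × Int) : Decidable (Pre_get_dominators A n cyc) := by unfold Pre_get_dominators; infer_instance

def pvWitness_get_dominators : List (List Int) × Int × (Int × Int × Int) :=
  ([[0, 1, 1, 1], [1, 0, 1, 1], [1, 1, 0, 1], [0, 1, 1, 0]], 4, (0, 1, 2))

def Spec_get_dominators (A : List (List Int)) (n : Int) (cyc : Int × Int × Int) (out : List Int) : Prop := out = get_dominators_alt A n cyc
instance (A : List (List Int)) (n : Int) (cyc : Int × Int × Int) (out : List Int) : Decidable (Spec_get_dominators A n cyc out) := by unfold Spec_get_dominators; infer_instance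

-- ===== CLAIM (what is proved, stated in full; the proofs are below) =====
def Claim_equal_get_dominators : Prop := ∀ (A : List (List Int)) (n : Int) (cyc : Int × Int × Int), Dom_get_dominators A n cyc → Pre_get_dominators A n cyc → Spec_get_dominators A n cyc (get_dominators A n cyc)

-- ===== LEMMAS AND PROOFS =====

-- A's output is the ascending filter of range(n) by "external and dominating".
theorem pv_A_eq_filter (A : List (List Int)) (n : Int) (cyc : Int × Int × Int) :
    get_dominators A n cyc =
      ((PySem.List.pyRange 0 n 1).filter
        (fun d => !(PySem.Set.contains (PySem.Set.ofList [cyc.1, cyc.2.1, cyc.2.2]) d))).filter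
        (fun d =>
          ((PySem.List.pyGetD (PySem.List.pyGetD A d []) cyc.1 0 != 0 &&
            PySem.List.pyGetD (PySem.List.pyGetD A d []) cyc.2.1 0 != 0 &&
            PySem.List.pyGetD (PySem.List.pyGetD A d []) cyc.2.2 0 != 0) ||
           (PySem.List.pyGetD (PySem.List.pyGetD A cyc.1 []) d 0 != 0 &&
            PySem.List.pyGetD (PySem.List.pyGetD A cyc.2.1 []) d 0 != 0 &&
            PySem.List.pyGetD (PySem.List.pyGetD A cyc.2.2 []) d 0 != 0))) := by
  unfold get_dominators
  rw [PySem.List.foldl_append_if_eq_filter]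
  simp

theorem get_dominators_spec_aux (A : List (List Int)) (n : Int) (cyc : Int × Int × Int) :
    get_dominators A n cyc = get_dominators_alt A n cyc := by
  rw [pv_A_eq_filter]
  unfold get_dominators_alt
  apply Eq.symm
  apply PySem.List.sorted_eq_of_perm_of_pairwise_lt
  · -- permutation: both sides are Nodup with the same members
    rw [List.perm_ext_iff_of_nodup]
    · intro x
      simp only [PySem.Set.mem_diff, PySem.Set.mem_union, PySem.Set.mem_inter,
        pvRowHits, pvColHits, PySem.Set.mem_ofList, List.mem_filter,
        PySem.List.mem_pyRange_one, PySem.Set.contains_eq_listContains,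
        List.contains_eq_mem, List.mem_cons, List.not_mem_nil, Bool.not_eq_true',
        decide_eq_false_iff_not, Bool.or_eq_true, Bool.and_eq_true]
      tauto
    · -- Nodup of A's filter-of-filter list
      exact ((PySem.List.nodup_pyRange_one 0 n).filter _).filter _
    · -- Nodup of B's set-difference list
      apply PySem.Set.nodup_diff
      apply PySem.Set.nodup_union
      apply PySem.Set.nodup_inter
      apply PySem.Set.nodup_inter
      exact PySem.Set.nodup_ofList _
  · -- A's list is strictly increasing
    exact ((PySem.List.pairwise_lt_pyRange_one 0 n).filter _).filter _

-- ===== VERDICT (by name: the statement is the Claim_ definition above) =====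
theorem get_dominators_spec : Claim_equal_get_dominators := by
  intro A n cyc _ _
  exact get_dominators_spec_aux A n cyc
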